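-- pv_equiv track=rewrite | github.com/AkashDeveloper8758/dsa_implementations | DSA_part_1/array/start.py | leftRotateByN
-- ===== SOURCE A (Python) =====
-- def leftRotateByN(arr,d):
--     firstArr = []
--     n = len(arr)
--     for i in range(d):
--         firstArr.append(arr[i])
--     for i in range(d,n):
--         arr[i-d] = arr[i]
--     for i in range(0,d):
--         arr[n-d+i] = firstArr[i]
--     return arr
-- ===== SOURCE B (Python) =====
-- def leftRotateByN(arr, d):
--     # Rotation by three in-place reversals (same return object and mutation as A for 0 <= d <= len(arr)).
--     n = len(arr)
--     def rev(lo, hi):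
--         while lo < hi:
--             arr[lo], arr[hi] = arr[hi], arr[lo]
--             lo += 1
--             hi -= 1
--     rev(0, d - 1)
--     rev(d, n - 1)
--     rev(0, n - 1)
--     return arr
-- ===== Notes on version B (the rewrite author's own statement) =====
-- stated objective: alternative
-- what changed: Replaces A's copy-first-block-then-shift-then-copy-back (three loops plus an auxiliary list) by the classic three-reversal in-place rotation with a two-pointer swap helper and no auxiliary list.
import Mathlib
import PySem

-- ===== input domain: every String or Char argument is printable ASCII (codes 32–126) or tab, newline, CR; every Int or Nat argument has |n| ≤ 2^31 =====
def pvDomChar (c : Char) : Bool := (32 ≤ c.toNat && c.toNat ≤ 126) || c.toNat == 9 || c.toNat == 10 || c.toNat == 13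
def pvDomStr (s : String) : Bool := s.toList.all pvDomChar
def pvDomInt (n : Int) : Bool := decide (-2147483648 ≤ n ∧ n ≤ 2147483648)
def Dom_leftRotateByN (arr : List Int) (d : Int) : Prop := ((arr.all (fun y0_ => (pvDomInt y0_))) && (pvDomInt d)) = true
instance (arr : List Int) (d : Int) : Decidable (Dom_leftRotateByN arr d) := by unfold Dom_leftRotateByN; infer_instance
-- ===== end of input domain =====

-- B replaces A's copy-and-shift loops (with an auxiliary list) by the classic three-reversal
-- in-place rotation (alternative algorithm, same O(n) cost). A mutates arr in place; B performs
-- the equivalent in-place mutation in Python; the equivalence proved here is about the return value.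


-- ===== PORT A =====
def leftRotateByN (arr : List Int) (d : Int) : List Int :=
  let n : Int := (arr.length : Int)
  -- for i in range(d): firstArr.append(arr[i])
  let firstArr : List Int :=
    (PySem.List.pyRange 0 d 1).foldl (fun fa i => fa ++ [PySem.List.pyGetD arr i 0]) []
  -- for i in range(d, n): arr[i-d] = arr[i]
  let arr1 : List Int :=
    (PySem.List.pyRange d n 1).foldl
      (fun a i => PySem.List.pySetD a (i - d) (PySem.List.pyGetD a i 0)) arr
  -- for i in range(0, d): arr[n-d+i] = firstArr[i]
  let arr2 : List Int :=
    (PySem.List.pyRange 0 d 1).foldl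
      (fun a i => PySem.List.pySetD a (n - d + i) (PySem.List.pyGetD firstArr i 0)) arr1
  arr2

-- ===== PORT B =====
-- two-pointer swap loop: while lo < hi: a[lo], a[hi] = a[hi], a[lo]; lo += 1; hi -= 1
def pvRev (a : List Int) (lo hi : Int) : List Int :=
  if _h : lo < hi then
    pvRev
      (PySem.List.pySetD (PySem.List.pySetD a lo (PySem.List.pyGetD a hi 0)) hi
        (PySem.List.pyGetD a lo 0))
      (lo + 1) (hi - 1)
  else a
termination_by (hi - lo).toNat
decreasing_by omega

def leftRotateByN_alt (arr : List Int) (d : Int) : List Int :=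
  let n : Int := (arr.length : Int)
  let a1 := pvRev arr 0 (d - 1)
  let a2 := pvRev a1 d (n - 1)
  pvRev a2 0 (n - 1)

-- ===== PRECONDITION & SPEC =====
-- Pre_ holds exactly where A returns: for d < 0 or d > len(arr) A raises IndexError.
def Pre_leftRotateByN (arr : List Int) (d : Int) : Prop := 0 ≤ d ∧ d ≤ (arr.length : Int)
instance (arr : List Int) (d : Int) : Decidable (Pre_leftRotateByN arr d) := by
  unfold Pre_leftRotateByN; infer_instance

def pvWitness_leftRotateByN : List Int × Int := ([1, 2, 3, 4, 5], 2)

def Spec_leftRotateByN (arr : List Int) (d : Int) (out : List Int) : Prop := out = leftRotateByN_alt arr d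
instance (arr : List Int) (d : Int) (out : List Int) : Decidable (Spec_leftRotateByN arr d out) := by unfold Spec_leftRotateByN; infer_instance

-- ===== CLAIM (what is proved, stated in full; the proofs are below) =====
def Claim_equal_leftRotateByN : Prop := ∀ (arr : List Int) (d : Int), Dom_leftRotateByN arr d → Pre_leftRotateByN arr d → Spec_leftRotateByN arr d (leftRotateByN arr d)

-- ===== LEMMAS AND PROOFS =====

lemma pvLoop1 (arr : List Int) (k : Nat) (hk : k ≤ arr.length) :
    (PySem.List.pyRange 0 (k : Int) 1).foldl (fun fa i => fa ++ [PySem.List.pyGetD arr i 0]) []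
      = arr.take k := by
  rw [PySem.List.foldl_append_singleton_eq_map]
  simp only [List.nil_append]
  induction k with
  | zero => simp [PySem.List.pyRange_one_eq_nil]
  | succ m ih =>
    rw [show ((m + 1 : Nat) : Int) = (m : Int) + 1 by push_cast; ring,
        PySem.List.pyRange_one_succ_right (by positivity), List.map_append,
        ih (by omega)]
    simp only [List.map_cons, List.map_nil, PySem.List.pyGetD_natCast]
    rw [List.take_add_one]
    simp [List.getD, List.getElem?_eq_getElem (by omega : m < arr.length)]

lemma pvLoop2 (arr : List Int) (dn m : Nat) (hd : dn ≤ m) (hm : m ≤ arr.length) :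
    (PySem.List.pyRange (dn : Int) (m : Int) 1).foldl
        (fun a i => PySem.List.pySetD a (i - (dn : Int)) (PySem.List.pyGetD a i 0)) arr
      = (arr.drop dn).take (m - dn) ++ arr.drop (m - dn) := by
  induction m, hd using Nat.le_induction with
  | base => simp [PySem.List.pyRange_one_eq_nil]
  | succ m hdm ih =>
    rw [show ((m + 1 : Nat) : Int) = (m : Int) + 1 by push_cast; ring,
        PySem.List.pyRange_one_succ_right (by exact_mod_cast hdm), List.foldl_append,
        ih (by omega)]
    simp only [List.foldl_cons, List.foldl_nil]
    rw [show (m : Int) - (dn : Int) = ((m - dn : Nat) : Int) by omega]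
    simp only [PySem.List.pySetD_natCast, PySem.List.pyGetD_natCast]
    have hlenP : ((arr.drop dn).take (m - dn)).length = m - dn := by
      simp; omega
    have hQ : arr.drop (m - dn) = arr[m - dn] :: arr.drop (m - dn + 1) :=
      List.drop_eq_getElem_cons (by omega)
    have hget : ((arr.drop dn).take (m - dn) ++ arr.drop (m - dn)).getD m 0 = arr[m] := by
      rw [List.getD_eq_getElem?_getD, List.getElem?_append_right (by omega)]
      rw [hlenP, List.getElem?_drop]
      rw [show m - dn + (m - (m - dn)) = m by omega]
      simp [List.getElem?_eq_getElem (by omega : m < arr.length)]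
      rfl
    rw [hget, List.set_append_right _ _ (by omega), hlenP,
        show m - dn - (m - dn) = 0 by omega, hQ]
    simp only [List.set_cons_zero]
    have htake : (arr.drop dn).take (m + 1 - dn) = (arr.drop dn).take (m - dn) ++ [arr[m]] := by
      rw [show m + 1 - dn = (m - dn) + 1 by omega, List.take_add_one,
          List.getElem?_drop, show dn + (m - dn) = m by omega]
      simp [List.getElem?_eq_getElem (by omega : m < arr.length)]
      rfl
    rw [htake, show m + 1 - dn = m - dn + 1 by omega]
    simp

lemma pvLoop3 (arr : List Int) (dn m : Nat) (hm : m ≤ dn) (hd : dn ≤ arr.length) :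
    (PySem.List.pyRange 0 (m : Int) 1).foldl
        (fun a i => PySem.List.pySetD a ((arr.length : Int) - (dn : Int) + i)
          (PySem.List.pyGetD (arr.take dn) i 0)) (arr.drop dn ++ arr.drop (arr.length - dn))
      = arr.drop dn ++ arr.take m ++ arr.drop (arr.length - dn + m) := by
  induction m with
  | zero => simp [PySem.List.pyRange_one_eq_nil]
  | succ m ih =>
    rw [show ((m + 1 : Nat) : Int) = (m : Int) + 1 by push_cast; ring,
        PySem.List.pyRange_one_succ_right (by positivity), List.foldl_append,
        ih (by omega)]
    simp only [List.foldl_cons, List.foldl_nil]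
    rw [show (arr.length : Int) - (dn : Int) + (m : Int) = ((arr.length - dn + m : Nat) : Int) by omega]
    simp only [PySem.List.pySetD_natCast, PySem.List.pyGetD_natCast]
    have hval : (arr.take dn).getD m 0 = arr[m] := by
      rw [List.getD_eq_getElem?_getD, List.getElem?_take_of_lt (by omega)]
      simp [List.getElem?_eq_getElem (by omega : m < arr.length)]
    have hlenAB : (arr.drop dn ++ arr.take m).length = arr.length - dn + m := by
      simp; omega
    have hC : arr.drop (arr.length - dn + m) = arr[arr.length - dn + m] :: arr.drop (arr.length - dn + m + 1) :=
      List.drop_eq_getElem_cons (by omega)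
    rw [hval, List.set_append_right _ _ (by rw [hlenAB]),
        hlenAB, Nat.sub_self, hC, List.set_cons_zero]
    have htk : arr.take (m + 1) = arr.take m ++ [arr[m]] := by
      rw [List.take_add_one, List.getElem?_eq_getElem (by omega : m < arr.length)]; rfl
    simp only [htk, show arr.length - dn + (m + 1) = arr.length - dn + m + 1 by omega,
      List.append_assoc, List.cons_append, List.nil_append]

lemma pvRev_spec_aux (N : Nat) : ∀ (p mid q : List Int), mid.length = N →
    pvRev (p ++ mid ++ q) (p.length : Int) ((p.length : Int) + (mid.length : Int) - 1)
      = p ++ mid.reverse ++ q := by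
  induction N using Nat.strong_induction_on with
  | _ N ih =>
    intro p mid q hN
    by_cases hsmall : mid.length < 2
    · -- mid = [] or [x]: the while loop does not run
      rw [pvRev, dif_neg (by omega)]
      interval_cases h : mid.length
      · rw [List.eq_nil_of_length_eq_zero h]; simp
      · obtain ⟨x, hx⟩ := List.length_eq_one_iff.mp h
        rw [hx]; simp
    · -- mid = x :: m ++ [y]
      obtain ⟨x, t, hx⟩ : ∃ x t, mid = x :: t := by
        cases mid with
        | nil => simp at hsmall
        | cons x t => exact ⟨x, t, rfl⟩
      obtain ⟨m, y, hy⟩ : ∃ m y, t = m ++ [y] := by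
        rcases List.eq_nil_or_concat t with h | ⟨m, y, h⟩
        · subst hx h; simp at hsmall
        · exact ⟨m, y, by rw [h, List.concat_eq_append]⟩
      subst hy hx
      have hcast : (p.length : Int) + ((x :: (m ++ [y])).length : Int) - 1
          = (((p.length + m.length + 1 : Nat)) : Int) := by simp; ring
      rw [pvRev, dif_pos (by simp; omega), hcast]
      have hgetlo : PySem.List.pyGetD (p ++ (x :: (m ++ [y])) ++ q) (p.length : Int) 0 = x := by
        rw [PySem.List.pyGetD_natCast, List.getD_eq_getElem?_getD, List.append_assoc,
          List.getElem?_append_right (le_refl _)]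
        simp
      have hrestr : p ++ (x :: (m ++ [y])) ++ q = (p ++ x :: m) ++ ([y] ++ q) := by simp
      have hgethi : PySem.List.pyGetD (p ++ (x :: (m ++ [y])) ++ q)
          (((p.length + m.length + 1 : Nat)) : Int) 0 = y := by
        rw [PySem.List.pyGetD_natCast, hrestr, List.getD_eq_getElem?_getD,
          List.getElem?_append_right (by simp only [List.length_append, List.length_cons]; omega)]
        simp
      rw [hgetlo, hgethi]
      simp only [PySem.List.pySetD_natCast]
      have hset1 : (p ++ (x :: (m ++ [y])) ++ q).set p.length y
          = p ++ (y :: (m ++ [y])) ++ q := by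
        rw [List.append_assoc, List.set_append_right _ _ (le_refl _), Nat.sub_self]
        simp
      have hset2 : (p ++ (y :: (m ++ [y])) ++ q).set (p.length + m.length + 1) x
          = (p ++ [y]) ++ m ++ ([x] ++ q) := by
        rw [show p ++ (y :: (m ++ [y])) ++ q = (p ++ y :: m) ++ ([y] ++ q) by simp,
          List.set_append_right _ _ (by simp only [List.length_append, List.length_cons]; omega),
          show p.length + m.length + 1 - (p ++ y :: m).length = 0 by simp]
        simp
      rw [hset1, hset2]
      have hlo' : (p.length : Int) + 1 = (((p ++ [y]).length : Nat) : Int) := by simp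
      have hhi' : (((p.length + m.length + 1 : Nat)) : Int) - 1
          = (((p ++ [y]).length : Nat) : Int) + ((m.length : Nat) : Int) - 1 := by
        simp; ring
      rw [hlo', hhi', ih m.length (by omega) (p ++ [y]) m ([x] ++ q) rfl]
      simp

lemma pvRev_spec (p mid q : List Int) :
    pvRev (p ++ mid ++ q) (p.length : Int) ((p.length : Int) + (mid.length : Int) - 1)
      = p ++ mid.reverse ++ q :=
  pvRev_spec_aux mid.length p mid q rfl

lemma pvA_eq (arr : List Int) (d : Int) (h0 : 0 ≤ d) (hd : d ≤ (arr.length : Int)) :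
    leftRotateByN arr d = arr.drop d.toNat ++ arr.take d.toNat := by
  obtain ⟨dn, rfl⟩ : ∃ dn : Nat, d = (dn : Int) := ⟨d.toNat, (Int.toNat_of_nonneg h0).symm⟩
  have hdn : dn ≤ arr.length := by exact_mod_cast hd
  simp only [leftRotateByN]
  rw [pvLoop1 arr dn hdn, pvLoop2 arr dn arr.length hdn (le_refl _),
      show (arr.drop dn).take (arr.length - dn) = arr.drop dn from
        List.take_of_length_le (by simp),
      pvLoop3 arr dn dn (le_refl _) hdn]
  simp [show arr.length - dn + dn = arr.length by omega]

lemma pvB_eq (arr : List Int) (d : Int) (h0 : 0 ≤ d) (hd : d ≤ (arr.length : Int)) :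
    leftRotateByN_alt arr d = arr.drop d.toNat ++ arr.take d.toNat := by
  obtain ⟨dn, rfl⟩ : ∃ dn : Nat, d = (dn : Int) := ⟨d.toNat, (Int.toNat_of_nonneg h0).symm⟩
  have hdn : dn ≤ arr.length := by exact_mod_cast hd
  have hlt : (arr.take dn).length = dn := by simp [hdn]
  have hld : (arr.drop dn).length = arr.length - dn := by simp
  simp only [leftRotateByN_alt]
  -- first reversal: the block arr[0..dn-1]
  have h1 : pvRev arr 0 ((dn : Int) - 1) = (arr.take dn).reverse ++ arr.drop dn := by
    have := pvRev_spec [] (arr.take dn) (arr.drop dn)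
    simp only [List.length_nil, Nat.cast_zero, List.nil_append, hlt, zero_add,
      List.take_append_drop] at this
    exact this
  -- second reversal: the block arr[dn..n-1]
  have h2 : pvRev ((arr.take dn).reverse ++ arr.drop dn) (dn : Int) ((arr.length : Int) - 1)
      = (arr.take dn).reverse ++ (arr.drop dn).reverse := by
    have := pvRev_spec ((arr.take dn).reverse) (arr.drop dn) []
    simp only [List.length_reverse, hlt, hld, List.append_nil] at this
    rw [show ((dn : Int)) + ((arr.length - dn : Nat) : Int) - 1 = (arr.length : Int) - 1 by
      omega] at this
    exact this
  -- third reversal: the whole array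
  have h3 : pvRev ((arr.take dn).reverse ++ (arr.drop dn).reverse) 0 ((arr.length : Int) - 1)
      = arr.drop dn ++ arr.take dn := by
    have := pvRev_spec [] ((arr.take dn).reverse ++ (arr.drop dn).reverse) []
    simp only [List.length_nil, Nat.cast_zero, List.nil_append, List.append_nil, zero_add,
      List.length_append, List.length_reverse, hlt, hld, List.reverse_append,
      List.reverse_reverse] at this
    rw [show (((dn + (arr.length - dn) : Nat)) : Int) - 1 = (arr.length : Int) - 1 by
      omega] at this
    exact this
  rw [h1, h2, h3, Int.toNat_natCast]

-- ===== VERDICT (by name: the statement is the Claim_ definition above) =====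
theorem leftRotateByN_spec : Claim_equal_leftRotateByN := by
  intro arr d _ hpre
  unfold Spec_leftRotateByN
  rw [pvA_eq arr d hpre.1 hpre.2, pvB_eq arr d hpre.1 hpre.2]
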